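-- pv_equiv track=rewrite | github.com/guykomash/data-structures-and-algorithms | leetcode/arrays-and-hashing/cropWord.py | cropWord
-- ===== SOURCE A (Python) =====
-- def cropWord(msg, K):
--     if len(msg) <= K : return msg
--
--     mobileMsg = ""
--     words = msg.split()
--     for w in words:
--         if len(mobileMsg) + len(w) <= K - 4:
--             mobileMsg += w + " "
--         else:
--             mobileMsg += '...'
--             break
--     return mobileMsg
-- ===== SOURCE B (Python) =====
-- def cropWord(msg, K):
--     if len(msg) <= K:
--         return msg
--     words = msg.split()
--     # prefix-sum table: cum[i] = length of words[:i] joined, each with a trailing space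
--     cum = [0]
--     for w in words:
--         cum.append(cum[-1] + len(w) + 1)
--     # cum is strictly increasing, so "prefix of i words fits" (cum[i] <= K-3) is a
--     # monotone predicate: binary-search the largest k with cum[k] <= K - 3
--     lo, hi = 0, len(words)
--     while lo < hi:
--         mid = (lo + hi + 1) // 2
--         if cum[mid] <= K - 3:
--             lo = mid
--         else:
--             hi = mid - 1
--     k = lo
--     out = "".join(w + " " for w in words[:k])
--     return out + "..." if k < len(words) else out
-- ===== Notes on version B (the rewrite author's own statement) =====
-- stated objective: alternative
-- what changed: A greedily accumulates words with an in-loop break and '...' append; B instead builds a prefix-sum length table, binary-searches it for the largest fitting prefix (valid since the prefix sums are strictly increasing, making the fit predicate monotone), and then constructs the output once with slice + join and a single conditional '...' append.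
import Mathlib
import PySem

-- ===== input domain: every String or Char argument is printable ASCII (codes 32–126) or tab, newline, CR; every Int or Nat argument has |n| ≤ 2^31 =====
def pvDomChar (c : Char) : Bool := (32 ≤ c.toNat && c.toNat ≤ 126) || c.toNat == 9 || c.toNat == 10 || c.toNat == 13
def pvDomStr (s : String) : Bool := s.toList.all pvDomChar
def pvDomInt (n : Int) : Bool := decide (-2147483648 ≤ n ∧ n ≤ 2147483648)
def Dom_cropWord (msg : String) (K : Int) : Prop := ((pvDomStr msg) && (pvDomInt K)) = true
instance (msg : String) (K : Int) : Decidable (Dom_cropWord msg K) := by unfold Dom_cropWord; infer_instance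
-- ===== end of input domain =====

-- B replaces A's greedy accumulate-and-break scan by a prefix-sum length table searched by
-- binary search for the largest fitting word prefix, then one slice + join; objective:
-- alternative algorithm, same asymptotic cost.

-- ===== PORT A =====
-- A's loop: accumulate mobileMsg word by word, append '...' and break on the first word
-- that does not fit.
def cropLoopA (K : Int) : List String → String → String
  | [], acc => acc
  | w :: ws, acc =>
    if PySem.Str.len acc + PySem.Str.len w ≤ K - 4 then
      cropLoopA K ws (acc ++ w ++ " ")
    else
      acc ++ "..."

def cropWord (msg : String) (K : Int) : String :=
  if PySem.Str.len msg ≤ K then msg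
  else cropLoopA K (PySem.Str.split₀ msg) ""

-- ===== PORT B =====
-- cum = [0]; for w in words: cum.append(cum[-1] + len(w) + 1)
-- (cum[-1] ported as pyGetD cum (-1) 0; cum is never empty, so this is exact)
def cumStepB (cum : List Int) (w : String) : List Int :=
  cum ++ [PySem.List.pyGetD cum (-1) 0 + PySem.Str.len w + 1]

def cumB (ws : List String) : List Int := ws.foldl cumStepB [0]

-- while lo < hi: mid = (lo+hi+1)//2; if cum[mid] <= T: lo = mid else: hi = mid - 1
-- (cum[mid] ported as pyGetD cum mid 0; mid always indexes in range here)
def bsearchB (cum : List Int) (T : Int) (lo hi : Int) : Int :=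
  if h : lo < hi then
    let mid := PySem.Int.floordiv (lo + hi + 1) 2
    if PySem.List.pyGetD cum mid 0 ≤ T then bsearchB cum T mid hi
    else bsearchB cum T lo (mid - 1)
  else lo
termination_by (hi - lo).toNat
decreasing_by
  all_goals
    have hb := PySem.Int.floordiv_two_mid_bounds (lo := lo + 1) (hi := hi) (by omega)
    rw [show lo + 1 + hi = lo + hi + 1 from by ring] at hb
    omega

def cropWord_alt (msg : String) (K : Int) : String :=
  if PySem.Str.len msg ≤ K then msg
  else
    let words := PySem.Str.split₀ msg
    let cum := cumB words
    let k := bsearchB cum (K - 3) 0 (PySem.List.len words)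
    let out := PySem.Str.join "" ((PySem.List.slice words none (some k)).map (fun w => w ++ " "))
    if k < PySem.List.len words then out ++ "..." else out

-- ===== PRECONDITION & SPEC =====
def Spec_cropWord (msg : String) (K : Int) (out : String) : Prop := out = cropWord_alt msg K
instance (msg : String) (K : Int) (out : String) : Decidable (Spec_cropWord msg K out) := by unfold Spec_cropWord; infer_instance

-- ===== CLAIM (what is proved, stated in full; the proofs are below) =====
def Claim_equal_cropWord : Prop := ∀ (msg : String) (K : Int), Dom_cropWord msg K → Spec_cropWord msg K (cropWord msg K)

-- ===== LEMMAS AND PROOFS =====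

lemma join_empty_nil : PySem.Str.join "" ([] : List String) = "" := by
  simp [PySem.Str.join, PySem.Chars.join, List.intercalate]

lemma join_empty_cons (w : String) (ws : List String) :
    PySem.Str.join "" (w :: ws) = w ++ PySem.Str.join "" ws := by
  rw [← String.toList_inj]
  cases ws with
  | nil => simp [PySem.Str.join, PySem.Chars.join, List.intercalate]
  | cons y ys => simp [PySem.Str.join, PySem.Chars.join, List.intercalate]

-- proof-side count of leading words A keeps (running length `total`, count `k`)
def cropCountB (K : Int) : List String → Int → Int → Int
  | [], _, k => k
  | w :: ws, total, k =>
    if total + PySem.Str.len w > K - 4 then k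
    else cropCountB K ws (total + PySem.Str.len w + 1) (k + 1)

lemma cropCountB_shift (K : Int) (ws : List String) (t k : Int) :
    cropCountB K ws t k = k + cropCountB K ws t 0 := by
  induction ws generalizing t k with
  | nil => simp [cropCountB]
  | cons w ws ih =>
    simp only [cropCountB]
    split_ifs with h
    · simp
    · rw [ih (k := k + 1), ih (k := 0 + 1)]; ring

lemma cropCountB_nonneg (K : Int) (ws : List String) (t : Int) :
    0 ≤ cropCountB K ws t 0 := by
  cases ws with
  | nil => simp [cropCountB]
  | cons w ws =>
    simp only [cropCountB]
    split_ifs with h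
    · omega
    · rw [cropCountB_shift]
      have := cropCountB_nonneg K ws (t + PySem.Str.len w + 1)
      omega

lemma cropCountB_le (K : Int) (ws : List String) (t : Int) :
    cropCountB K ws t 0 ≤ (ws.length : Int) := by
  induction ws generalizing t with
  | nil => simp [cropCountB]
  | cons w ws ih =>
    simp only [cropCountB]
    split_ifs with h
    · simp; omega
    · rw [cropCountB_shift]
      have := ih (t + PySem.Str.len w + 1)
      simp only [List.length_cons]
      push_cast
      omega

-- the joined kept prefix: "".join((w + " ") for w in ws[:k])
def cropJoin (ws : List String) (k : Int) : String :=
  PySem.Str.join "" ((PySem.List.slice ws none (some k)).map (fun w => w ++ " "))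

lemma crop_main (K : Int) (ws : List String) (acc : String) :
    cropLoopA K ws acc =
      (if cropCountB K ws (PySem.Str.len acc) 0 < PySem.List.len ws
       then acc ++ cropJoin ws (cropCountB K ws (PySem.Str.len acc) 0) ++ "..."
       else acc ++ cropJoin ws (cropCountB K ws (PySem.Str.len acc) 0)) := by
  induction ws generalizing acc with
  | nil =>
    simp [cropLoopA, cropCountB, cropJoin, join_empty_nil, PySem.List.slice, PySem.List.len]
  | cons w ws ih =>
    by_cases h : PySem.Str.len acc + PySem.Str.len w ≤ K - 4
    · have hacc : PySem.Str.len (acc ++ w ++ " ") = PySem.Str.len acc + PySem.Str.len w + 1 := by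
        simp [PySem.Str.len_eq]; ring
      have hk : cropCountB K (w :: ws) (PySem.Str.len acc) 0 =
          1 + cropCountB K ws (PySem.Str.len acc + PySem.Str.len w + 1) 0 := by
        simp only [cropCountB]
        rw [if_neg (by omega), cropCountB_shift]
        omega
      have hk' : 0 ≤ cropCountB K ws (PySem.Str.len acc + PySem.Str.len w + 1) 0 :=
        cropCountB_nonneg K ws _
      set k' := cropCountB K ws (PySem.Str.len acc + PySem.Str.len w + 1) 0 with hk'def
      have hjoin : cropJoin (w :: ws) (1 + k') = (w ++ " ") ++ cropJoin ws k' := by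
        unfold cropJoin
        rw [PySem.List.slice_to (w :: ws) (by omega), PySem.List.slice_to ws hk']
        have h1 : (1 + k').toNat = k'.toNat + 1 := by omega
        rw [h1, List.take_succ_cons, List.map_cons, join_empty_cons]
      have hlt : (1 + k' < PySem.List.len (w :: ws)) ↔ (k' < PySem.List.len ws) := by
        simp only [PySem.List.len_eq, List.length_cons]
        push_cast; omega
      have hassoc : ∀ rest : String, acc ++ ((w ++ " ") ++ rest) = (acc ++ w ++ " ") ++ rest := by
        intro rest; rw [← String.toList_inj]; simp
      show cropLoopA K (w :: ws) acc = _
      rw [show cropLoopA K (w :: ws) acc = cropLoopA K ws (acc ++ w ++ " ") from by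
        simp only [cropLoopA]; rw [if_pos h]]
      rw [ih, hacc, hk, hjoin]
      by_cases hc : k' < PySem.List.len ws
      · rw [if_pos hc, if_pos (hlt.mpr hc), hassoc]
      · rw [if_neg hc, if_neg (fun hx => hc (hlt.mp hx)), hassoc]
    · have hk : cropCountB K (w :: ws) (PySem.Str.len acc) 0 = 0 := by
        simp only [cropCountB]; rw [if_pos (by omega)]
      have hjoin : cropJoin (w :: ws) 0 = "" := by
        unfold cropJoin
        rw [PySem.List.slice_to (w :: ws) (by omega)]
        simp [join_empty_nil]
      rw [show cropLoopA K (w :: ws) acc = acc ++ "..." from by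
        simp only [cropLoopA]; rw [if_neg h]]
      rw [hk, hjoin]
      rw [if_pos (by simp only [PySem.List.len_eq, List.length_cons]; push_cast; omega)]
      congr 1
      rw [← String.toList_inj]; simp

-- ---- B side: characterise the prefix-sum table and the binary search ----

-- tail of the prefix-sum table starting after running total t
def cumP : List String → Int → List Int
  | [], _ => []
  | w :: ws, t => (t + PySem.Str.len w + 1) :: cumP ws (t + PySem.Str.len w + 1)

lemma cumP_length (ws : List String) (t : Int) : (cumP ws t).length = ws.length := by
  induction ws generalizing t with
  | nil => simp [cumP]
  | cons w ws ih => simp [cumP, ih]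

lemma foldl_cumStepB (ws : List String) (acc : List Int) (t : Int)
    (h : PySem.List.pyGetD acc (-1) 0 = t) (hne : acc ≠ []) :
    ws.foldl cumStepB acc = acc ++ cumP ws t := by
  induction ws generalizing acc t with
  | nil => simp [cumP]
  | cons w ws ih =>
    have hstep : cumStepB acc w = acc ++ [t + PySem.Str.len w + 1] := by
      simp [cumStepB, h]
    simp only [List.foldl_cons, hstep]
    rw [ih (acc ++ [t + PySem.Str.len w + 1]) (t + PySem.Str.len w + 1)
        (PySem.List.pyGetD_neg_one_append_singleton acc (t + PySem.Str.len w + 1) 0) (by simp)]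
    simp [cumP]

lemma cumB_eq (ws : List String) : cumB ws = 0 :: cumP ws 0 := by
  unfold cumB
  rw [foldl_cumStepB ws [0] 0 (by decide) (by simp)]
  simp

-- the table entry at (clamped) index j, as a recursive function
def ctF : List String → Int → Int → Int
  | [], t, _ => t
  | w :: ws, t, j => if j ≤ 0 then t else ctF ws (t + PySem.Str.len w + 1) (j - 1)

lemma ctF_zero (ws : List String) (t : Int) : ctF ws t 0 = t := by
  cases ws <;> simp [ctF]

lemma str_len_nonneg (w : String) : 0 ≤ PySem.Str.len w := by
  simp [PySem.Str.len_eq]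

lemma pyGetD_cons_shift (x : Int) (xs : List Int) (j : Int) (h1 : 1 ≤ j) (h2 : j ≤ (xs.length : Int)) :
    PySem.List.pyGetD (x :: xs) j 0 = PySem.List.pyGetD xs (j - 1) 0 := by
  rw [PySem.List.pyGetD_eq_getElem (x :: xs) 0 (by omega) (by simp; omega),
      PySem.List.pyGetD_eq_getElem xs 0 (by omega) (by omega)]
  have hj : j.toNat = (j - 1).toNat + 1 := by omega
  simp only [hj, List.getElem_cons_succ]

lemma pyGetD_ct (ws : List String) (t : Int) (j : Int) (h0 : 0 ≤ j) (h1 : j ≤ (ws.length : Int)) :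
    PySem.List.pyGetD (t :: cumP ws t) j 0 = ctF ws t j := by
  induction ws generalizing t j with
  | nil =>
    simp only [List.length_nil, Nat.cast_zero] at h1
    have : j = 0 := by omega
    subst this
    simp [cumP, ctF, PySem.List.pyGetD_zero_cons]
  | cons w ws ih =>
    by_cases hz : j ≤ 0
    · have : j = 0 := by omega
      subst this
      simp [ctF, PySem.List.pyGetD_zero_cons]
    · have hlen : j ≤ ((cumP (w :: ws) t).length : Int) := by
        rw [cumP_length]; exact h1
      rw [pyGetD_cons_shift t (cumP (w :: ws) t) j (by omega) hlen]
      simp only [cumP]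
      rw [ih (t + PySem.Str.len w + 1) (j - 1) (by omega)
          (by simp only [List.length_cons] at h1; push_cast at h1 ⊢; omega)]
      simp only [ctF]
      rw [if_neg hz]

lemma ctF_ge (ws : List String) (t : Int) (j : Int) : t ≤ ctF ws t j := by
  induction ws generalizing t j with
  | nil => simp [ctF]
  | cons w ws ih =>
    simp only [ctF]
    split_ifs with h
    · omega
    · have := ih (t + PySem.Str.len w + 1) (j - 1)
      have := str_len_nonneg w
      omega

lemma ctF_mono (ws : List String) (t : Int) (i j : Int) (hij : i ≤ j) :
    ctF ws t i ≤ ctF ws t j := by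
  induction ws generalizing t i j with
  | nil => simp [ctF]
  | cons w ws ih =>
    simp only [ctF]
    split_ifs with hi hj
    · rfl
    · have h1 : t ≤ ctF ws (t + PySem.Str.len w + 1) (j - 1) := by
        have := ctF_ge ws (t + PySem.Str.len w + 1) (j - 1)
        have := str_len_nonneg w
        omega
      exact h1
    · omega
    · exact ih _ (i - 1) (j - 1) (by omega)

lemma ctF_le_of_kept (K : Int) (ws : List String) (t j : Int)
    (h1 : 1 ≤ j) (h2 : j ≤ cropCountB K ws t 0) : ctF ws t j ≤ K - 3 := by
  induction ws generalizing t j with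
  | nil => simp [cropCountB] at h2; omega
  | cons w ws ih =>
    simp only [cropCountB] at h2
    split_ifs at h2 with h
    · omega
    · rw [cropCountB_shift] at h2
      simp only [ctF]
      rw [if_neg (by omega)]
      by_cases hj1 : j = 1
      · subst hj1
        rw [show (1 : Int) - 1 = 0 from rfl, ctF_zero]
        omega
      · exact ih (t + PySem.Str.len w + 1) (j - 1) (by omega) (by omega)

lemma ctF_gt_of_dropped (K : Int) (ws : List String) (t : Int)
    (h : cropCountB K ws t 0 < (ws.length : Int)) :
    K - 3 < ctF ws t (cropCountB K ws t 0 + 1) := by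
  induction ws generalizing t with
  | nil => simp [cropCountB] at h
  | cons w ws ih =>
    simp only [cropCountB] at h ⊢
    split_ifs with hw
    · rw [show (0 : Int) + 1 = 1 from rfl]
      simp only [ctF]
      rw [if_neg (by omega), show (1 : Int) - 1 = 0 from rfl, ctF_zero]
      omega
    · rw [cropCountB_shift] at h ⊢
      have hnn := cropCountB_nonneg K ws (t + PySem.Str.len w + 1)
      simp only [ctF]
      rw [if_neg (by omega)]
      have hh : cropCountB K ws (t + PySem.Str.len w + 1) 0 < (ws.length : Int) := by
        simp only [List.length_cons] at h; push_cast at h; omega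
      have := ih (t + PySem.Str.len w + 1) hh
      rw [show 0 + 1 + cropCountB K ws (t + PySem.Str.len w + 1) 0 + 1 - 1
            = cropCountB K ws (t + PySem.Str.len w + 1) 0 + 1 from by ring]
      exact this

lemma bsearch_eq (ws : List String) (K : Int) (g : Nat) :
    ∀ lo hi : Int, (hi - lo).toNat ≤ g → 0 ≤ lo →
      lo ≤ cropCountB K ws 0 0 → cropCountB K ws 0 0 ≤ hi → hi ≤ (ws.length : Int) →
      bsearchB (0 :: cumP ws 0) (K - 3) lo hi = cropCountB K ws 0 0 := by
  induction g with
  | zero =>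
    intro lo hi hg h0 hlo hhi hn
    have : ¬ lo < hi := by omega
    rw [bsearchB, dif_neg this]
    omega
  | succ g ih =>
    intro lo hi hg h0 hlo hhi hn
    by_cases hlh : lo < hi
    · have hb := PySem.Int.floordiv_two_mid_bounds (lo := lo + 1) (hi := hi) (by omega)
      rw [show lo + 1 + hi = lo + hi + 1 from by ring] at hb
      set mid := PySem.Int.floordiv (lo + hi + 1) 2 with hmid
      have haccess : PySem.List.pyGetD (0 :: cumP ws 0) mid 0 = ctF ws 0 mid :=
        pyGetD_ct ws 0 mid (by omega) (by omega)
      rw [bsearchB, dif_pos hlh]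
      simp only [← hmid, haccess]
      split_ifs with hle
      · -- cum[mid] ≤ T, so mid ≤ k0
        have hmk : mid ≤ cropCountB K ws 0 0 := by
          by_contra hc
          rw [not_le] at hc
          have hkn : cropCountB K ws 0 0 < (ws.length : Int) := by omega
          have h3 := ctF_gt_of_dropped K ws 0 hkn
          have h4 := ctF_mono ws 0 (cropCountB K ws 0 0 + 1) mid (by omega)
          omega
        exact ih mid hi (by omega) (by omega) hmk hhi hn
      · -- cum[mid] > T, so k0 ≤ mid - 1
        have hmk : cropCountB K ws 0 0 ≤ mid - 1 := by
          by_contra hc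
          rw [not_le] at hc
          have := ctF_le_of_kept K ws 0 mid (by omega) (by omega)
          omega
        exact ih lo (mid - 1) (by omega) h0 hlo hmk (by omega)
    · rw [bsearchB, dif_neg hlh]
      omega

-- ===== VERDICT (by name: the statement is the Claim_ definition above) =====
theorem cropWord_spec : Claim_equal_cropWord := by
  intro msg K _
  unfold Spec_cropWord cropWord cropWord_alt
  split_ifs with h
  · rfl
  · set ws := PySem.Str.split₀ msg with hws
    have hk : bsearchB (cumB ws) (K - 3) 0 (PySem.List.len ws) = cropCountB K ws 0 0 := by
      rw [cumB_eq, PySem.List.len_eq]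
      exact bsearch_eq ws K ws.length 0 ((ws.length : Int)) (by omega) (by omega)
        (cropCountB_nonneg K ws 0) (cropCountB_le K ws 0) (by omega)
    have hm := crop_main K ws ""
    have h0 : PySem.Str.len "" = 0 := by decide
    rw [h0] at hm
    have hempty : ∀ s : String, "" ++ s = s := fun s => by rw [← String.toList_inj]; simp
    rw [hm]
    simp only [hk, cropJoin]
    split_ifs with hc
    · rw [hempty]
    · rw [hempty]
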